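-- pv_equiv track=rewrite | github.com/AlgorithmGlodPlus/Star_Hunter | programmers/2022_08_18_01.py | solution
-- ===== SOURCE A (Python) =====
-- def solution(answers):
--     answer = []
--
--     first = [1, 2, 3, 4, 5]
--     second = [2, 1, 2, 3, 2, 4, 2, 5]
--     third = [3, 3, 1, 1, 2, 2, 4, 4, 5, 5]
--
--     count = [0, 0, 0]
--
--     for i in range(len(answers)):
--         if answers[i] == first[i % len(first)]:
--             count[0] += 1
--
--         if answers[i] == second[i % len(second)]:
--             count[1] += 1
--
--         if answers[i] == third[i % len(third)]:
--             count[2] += 1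
--
--     max_count = max(count)
--     for i in range(3):
--         if max_count == count[i]:
--             answer.append(i + 1)
--
--     return sorted(answer)
-- ===== SOURCE B (Python) =====
-- def solution(answers):
--     def matches(ans, pattern):
--         # walk the answers chunkwise: compare each pattern-length block
--         # elementwise against the pattern via zip -- no modular indexing
--         total = 0
--         for start in range(0, len(ans), len(pattern)):
--             total += sum(a == p for a, p in zip(ans[start:start + len(pattern)], pattern))
--         return total
--
--     counts = [matches(answers, p) for p in (
--         [1, 2, 3, 4, 5],
--         [2, 1, 2, 3, 2, 4, 2, 5],
--         [3, 3, 1, 1, 2, 2, 4, 4, 5, 5],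
--     )]
--     best = max(counts)
--     return [k for k in (1, 2, 3) if counts[k - 1] == best]
-- ===== Notes on version B (the rewrite author's own statement) =====
-- stated objective: alternative
-- what changed: Instead of A's single position-indexed loop that tests answers[i] against pattern[i % len] with three if-branches over a mutable count list, B consumes the answers chunkwise: per pattern, a loop over the chunk starts zips each pattern-length block against the whole pattern, so no modular indexing (and no per-element index arithmetic) occurs; the best pattern numbers are then selected by a comprehension instead of an append loop plus a redundant sort.
import Mathlib
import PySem

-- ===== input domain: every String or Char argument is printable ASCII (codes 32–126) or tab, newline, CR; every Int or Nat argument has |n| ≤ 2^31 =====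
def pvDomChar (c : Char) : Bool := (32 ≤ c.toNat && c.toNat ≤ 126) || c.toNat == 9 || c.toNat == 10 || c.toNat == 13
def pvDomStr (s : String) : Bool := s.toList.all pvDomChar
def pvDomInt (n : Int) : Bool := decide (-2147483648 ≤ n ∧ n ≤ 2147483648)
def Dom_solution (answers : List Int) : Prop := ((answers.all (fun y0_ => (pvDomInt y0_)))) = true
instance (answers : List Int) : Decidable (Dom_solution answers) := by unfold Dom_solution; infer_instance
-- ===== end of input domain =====

-- B replaces A's single position-indexed loop (answers[i] vs pattern[i % len], three
-- hardcoded if-branches, append loop plus a redundant sort) by chunkwise consumption: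
-- a while loop zips the remaining answers against the whole pattern and drops a
-- pattern-length block each round, with no modular indexing at all.

-- ===== PORT A =====
-- One combined pass over range(len(answers)); all list indexings are in range, so the
-- pyGetD default 0 is never used.
def solution (answers : List Int) : List Int :=
  let first : List Int := [1, 2, 3, 4, 5]
  let second : List Int := [2, 1, 2, 3, 2, 4, 2, 5]
  let third : List Int := [3, 3, 1, 1, 2, 2, 4, 4, 5, 5]
  let count : Int × Int × Int :=
    (PySem.List.pyRange 0 (PySem.List.len answers) 1).foldl
      (fun c i =>
        let c := if PySem.List.pyGetD answers i 0
                    = PySem.List.pyGetD first (PySem.Int.mod i (PySem.List.len first)) 0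
                 then (c.1 + 1, c.2.1, c.2.2) else c
        let c := if PySem.List.pyGetD answers i 0
                    = PySem.List.pyGetD second (PySem.Int.mod i (PySem.List.len second)) 0
                 then (c.1, c.2.1 + 1, c.2.2) else c
        if PySem.List.pyGetD answers i 0
            = PySem.List.pyGetD third (PySem.Int.mod i (PySem.List.len third)) 0
        then (c.1, c.2.1, c.2.2 + 1) else c)
      (0, 0, 0)
  let countL : List Int := [count.1, count.2.1, count.2.2]
  -- max(count): countL has three elements, so max? is always some; getD 0 is never used
  let maxCount : Int := (PySem.List.max? countL (fun x => x)).getD 0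
  let answer : List Int :=
    (PySem.List.pyRange 0 3 1).foldl
      (fun acc i => if maxCount = PySem.List.pyGetD countL i 0 then acc ++ [i + 1] else acc) []
  PySem.List.sorted answer (fun x => x) false

-- ===== PORT B =====
-- Source B's 'matches(ans, pattern)': walk the answers chunkwise — for each start in
-- range(0, len(ans), len(pattern)) compare the block ans[start:start+len(pattern)]
-- elementwise against the pattern via zip; no modular indexing anywhere.
def chunkMatches (ans : List Int) (pattern : List Int) : Int :=
  (PySem.List.pyRange 0 (PySem.List.len ans) (PySem.List.len pattern)).foldl
    (fun total start =>
      total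
        + (((PySem.List.slice ans (some start) (some (start + PySem.List.len pattern))).zip
              pattern).map (fun ab => if ab.1 = ab.2 then (1 : Int) else 0)).sum)
    0

def solution_alt (answers : List Int) : List Int :=
  let counts : List Int :=
    [chunkMatches answers [1, 2, 3, 4, 5],
     chunkMatches answers [2, 1, 2, 3, 2, 4, 2, 5],
     chunkMatches answers [3, 3, 1, 1, 2, 2, 4, 4, 5, 5]]
  -- max(counts): counts has three elements, so max? is always some; getD 0 is never used
  let best : Int := (PySem.List.max? counts (fun x => x)).getD 0
  [1, 2, 3].filterMap (fun k => if PySem.List.pyGetD counts (k - 1) 0 = best then some k else none)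

-- ===== PRECONDITION & SPEC =====
def Spec_solution (answers : List Int) (out : List Int) : Prop := out = solution_alt answers
instance (answers : List Int) (out : List Int) : Decidable (Spec_solution answers out) := by unfold Spec_solution; infer_instance

-- ===== CLAIM (what is proved, stated in full; the proofs are below) =====
def Claim_equal_solution : Prop := ∀ (answers : List Int), Dom_solution answers → Spec_solution answers (solution answers)

-- ===== LEMMAS AND PROOFS =====

-- Common normal form for both counting strategies: per-index modular match count.
def modCount (p : List Int) (xs : List Int) : Int :=
  ((List.range xs.length).map
    (fun i => if xs.getD i 0 = p.getD (i % p.length) 0 then (1 : Int) else 0)).sum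

-- A's interleaved triple-counting loop splits into three independent 0/1 sums.
theorem triple_fold (p1 p2 p3 : Int → Prop) [DecidablePred p1] [DecidablePred p2] [DecidablePred p3] :
    ∀ (l : List Int) (a b c : Int),
      l.foldl
        (fun (s : Int × Int × Int) i =>
          let s := if p1 i then (s.1 + 1, s.2.1, s.2.2) else s
          let s := if p2 i then (s.1, s.2.1 + 1, s.2.2) else s
          if p3 i then (s.1, s.2.1, s.2.2 + 1) else s)
        (a, b, c)
      = (a + (l.map (fun i => if p1 i then (1 : Int) else 0)).sum,
         b + (l.map (fun i => if p2 i then (1 : Int) else 0)).sum,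
         c + (l.map (fun i => if p3 i then (1 : Int) else 0)).sum) := by
  intro l
  induction l with
  | nil => intro a b c; simp
  | cons x xs ih =>
      intro a b c
      simp only [List.foldl_cons, List.map_cons, List.sum_cons]
      split_ifs <;> simp [ih] <;> ring_nf <;> simp

-- A's per-pattern sum (pyRange / pyGetD / Int.mod) is modCount.
theorem a_count (p : List Int) (xs : List Int) :
    ((PySem.List.pyRange 0 (PySem.List.len xs) 1).map
      (fun i => if PySem.List.pyGetD xs i 0
                  = PySem.List.pyGetD p (PySem.Int.mod i (PySem.List.len p)) 0
                then (1 : Int) else 0)).sum = modCount p xs := by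
  unfold modCount
  rw [show PySem.List.len xs = (xs.length : Int) from rfl, PySem.List.pyRange_zero_natCast,
    List.map_map]
  refine congrArg List.sum (List.map_congr_left ?_)
  intro i hi
  rw [Function.comp_apply, show PySem.List.len p = (p.length : Int) from rfl,
    PySem.Int.mod_natCast, PySem.List.pyGetD_natCast, PySem.List.pyGetD_natCast]

-- The elementwise zip sum of one chunk, as a sum over the first min-length indices.
theorem zip_sum (xs p : List Int) :
    ((xs.zip p).map (fun ab => if ab.1 = ab.2 then (1 : Int) else 0)).sum
      = ((List.range (min xs.length p.length)).map
          (fun i => if xs.getD i 0 = p.getD i 0 then (1 : Int) else 0)).sum := by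
  induction xs generalizing p with
  | nil => simp
  | cons a xs ih =>
      cases p with
      | nil => simp
      | cons b p =>
          simp only [List.zip_cons_cons, List.map_cons, List.sum_cons, List.length_cons,
            Nat.succ_min_succ, List.range_succ_eq_map, List.map_map, Function.comp_def,
            Nat.succ_eq_add_one, List.getD_cons_zero, List.getD_cons_succ]
          rw [ih]

-- Peeling one pattern-length chunk off modCount.
theorem modCount_chunk (p : List Int) (hp : p ≠ []) (xs : List Int) :
    modCount p xs
      = ((xs.zip p).map (fun ab => if ab.1 = ab.2 then (1 : Int) else 0)).sum
        + modCount p (xs.drop p.length) := by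
  have hL : 0 < p.length := List.length_pos_of_ne_nil hp
  by_cases h : xs.length ≤ p.length
  · rw [List.drop_eq_nil_of_le h, zip_sum, Nat.min_eq_left h]
    unfold modCount
    simp only [List.length_nil, List.range_zero, List.map_nil, List.sum_nil, add_zero]
    refine congrArg List.sum (List.map_congr_left ?_)
    intro i hi
    rw [Nat.mod_eq_of_lt (lt_of_lt_of_le (List.mem_range.mp hi) h)]
  · have h : p.length < xs.length := by omega
    rw [zip_sum, Nat.min_eq_right (le_of_lt h)]
    unfold modCount
    have hn : xs.length = p.length + (xs.length - p.length) := by omega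
    conv_lhs => rw [hn]
    rw [List.range_add, List.map_append, List.sum_append]
    congr 1
    · refine congrArg List.sum (List.map_congr_left ?_)
      intro i hi
      rw [Nat.mod_eq_of_lt (List.mem_range.mp hi)]
    · rw [List.map_map]
      have hlen : (xs.drop p.length).length = xs.length - p.length := by simp
      rw [hlen]
      refine congrArg List.sum (List.map_congr_left ?_)
      intro j hj
      simp [Function.comp, Nat.add_mod_left, List.getD, List.getElem?_drop]

-- zip truncates at the shorter list, so taking pattern-length first changes nothing.
theorem zip_take_self : ∀ (xs p : List Int), (xs.take p.length).zip p = xs.zip p := by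
  intro xs
  induction xs with
  | nil => intro p; simp
  | cons a xs ih =>
      intro p
      cases p with
      | nil => simp
      | cons b p => simp [ih]

-- One chunk-count step of the ceiling ⌈n / L⌉ driving the chunk loop.
theorem ceil_step (L n : Nat) (hL : 0 < L) (hn : 0 < n) :
    (n + L - 1) / L = ((n - L) + L - 1) / L + 1 := by
  obtain ⟨n', rfl⟩ : ∃ n', n = n' + 1 := ⟨n - 1, by omega⟩
  have h1 : n' + 1 + L - 1 = n' + L := by omega
  rw [h1, Nat.add_div_right _ hL]
  rcases le_or_gt (n' + 1) L with h | h
  · have h2 : n' + 1 - L = 0 := by omega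
    rw [h2, Nat.div_eq_of_lt (by omega), Nat.div_eq_of_lt (by omega)]
  · have h3 : n' + 1 - L + L - 1 = n' + 1 - L - 1 + L := by omega
    rw [h3, Nat.add_div_right _ hL]
    congr 1
    have h4 : n' = n' + 1 - L - 1 + L := by omega
    conv_lhs => rw [h4]
    rw [Nat.add_div_right _ hL]

-- Summing the chunkwise zip counts over all ⌈n / L⌉ chunk starts gives modCount.
theorem chunks_sum (p : List Int) (hp : p ≠ []) :
    ∀ (m : Nat) (ans : List Int), m = (ans.length + p.length - 1) / p.length →
      ((List.range m).map (fun k =>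
          ((((ans.drop (p.length * k)).take p.length).zip p).map
            (fun ab => if ab.1 = ab.2 then (1 : Int) else 0)).sum)).sum
        = modCount p ans := by
  have hL : 0 < p.length := List.length_pos_of_ne_nil hp
  intro m
  induction m with
  | zero =>
      intro ans h
      have hn : ans.length = 0 := by
        rcases Nat.lt_or_ge (ans.length + p.length - 1) p.length with h' | h'
        · omega
        · rw [eq_comm, Nat.div_eq_zero_iff] at h; omega
      have : ans = [] := List.length_eq_zero_iff.mp hn
      subst this
      simp [modCount]
  | succ m ih =>
      intro ans h
      have hn : 0 < ans.length := by
        by_contra h0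
        have : ans.length = 0 := by omega
        rw [this, Nat.zero_add, Nat.div_eq_of_lt (by omega)] at h
        omega
      rw [List.range_succ_eq_map, List.map_cons, List.sum_cons, List.map_map]
      have hterm0 : ((((ans.drop (p.length * 0)).take p.length).zip p).map
          (fun ab => if ab.1 = ab.2 then (1 : Int) else 0)).sum
          = ((ans.zip p).map (fun ab => if ab.1 = ab.2 then (1 : Int) else 0)).sum := by
        rw [Nat.mul_zero, List.drop_zero, zip_take_self]
      have htail : ∀ k : Nat,
          (ans.drop (p.length * (k + 1))).take p.length
            = ((ans.drop p.length).drop (p.length * k)).take p.length := by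
        intro k
        rw [List.drop_drop, show p.length + p.length * k = p.length * (k + 1) from by ring]
      have hm' : m = ((ans.drop p.length).length + p.length - 1) / p.length := by
        rw [List.length_drop]
        have := ceil_step p.length ans.length hL hn
        omega
      rw [hterm0, modCount_chunk p hp ans]
      congr 1
      rw [← ih (ans.drop p.length) hm']
      refine congrArg List.sum (List.map_congr_left ?_)
      intro k hk
      simp only [Function.comp_apply]
      rw [htail k]

-- B's chunkwise for loop computes modCount.
theorem chunk_eq (ans : List Int) (q : Int) (qs : List Int) :
    chunkMatches ans (q :: qs) = modCount (q :: qs) ans := by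
  have hL : 0 < (q :: qs).length := by simp
  unfold chunkMatches
  rw [PySem.List.foldl_add, zero_add]
  rw [show PySem.List.len ans = ((ans.length : Nat) : Int) from rfl,
    show PySem.List.len (q :: qs) = (((q :: qs).length : Nat) : Int) from rfl]
  rw [PySem.List.pyRange_of_pos _ _ (by exact_mod_cast hL), List.map_map]
  have hm : (if (0 : Int) < (ans.length : Int)
        then (((ans.length : Int) - 0 + ((q :: qs).length : Int) - 1) / ((q :: qs).length : Int)).toNat
        else 0)
      = (ans.length + (q :: qs).length - 1) / (q :: qs).length := by
    split_ifs with h0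
    · have h1 : ((ans.length : Int) - 0 + ((q :: qs).length : Int) - 1)
          = ((ans.length + (q :: qs).length - 1 : Nat) : Int) := by omega
      rw [h1, ← Int.natCast_div, Int.toNat_natCast]
    · have h2 : ans.length = 0 := by omega
      rw [h2, Nat.zero_add, Nat.div_eq_of_lt (by omega)]
  rw [hm]
  refine Eq.trans ?_ (chunks_sum (q :: qs) (by simp) _ ans rfl)
  refine congrArg List.sum (List.map_congr_left ?_)
  intro k hk
  simp only [Function.comp_apply]
  have hidx : (0 : Int) + ((q :: qs).length : Int) * (k : Int)
      = (((q :: qs).length * k : Nat) : Int) := by push_cast; ring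
  rw [hidx, show (((q :: qs).length * k : Nat) : Int) + ((q :: qs).length : Int)
      = (((q :: qs).length * k : Nat) : Int) + (((q :: qs).length : Nat) : Int) from rfl,
    PySem.List.slice_natCast_add]

-- Selecting the argmax positions: A's append loop followed by sorted equals B's
-- filterMap over the literal list [1, 2, 3].
theorem select_eq (s1 s2 s3 : Int) :
    PySem.List.sorted
      ((PySem.List.pyRange 0 3 1).foldl
        (fun acc i =>
          if (PySem.List.max? [s1, s2, s3] (fun x => x)).getD 0 = PySem.List.pyGetD [s1, s2, s3] i 0
          then acc ++ [i + 1] else acc) [])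
      (fun x => x) false
    = ([1, 2, 3] : List Int).filterMap
        (fun k =>
          if PySem.List.pyGetD [s1, s2, s3] (k - 1) 0 = (PySem.List.max? [s1, s2, s3] (fun x => x)).getD 0
          then some k else none) := by
  have hrange : PySem.List.pyRange 0 3 1 = [0, 1, 2] := rfl
  rw [hrange]
  simp only [List.foldl_cons, List.foldl_nil, List.filterMap_cons, List.filterMap_nil]
  norm_num [PySem.List.pyGetD_ofNat', PySem.List.pyGetD]
  generalize (PySem.List.max? [s1, s2, s3] (fun x => x)).getD 0 = m
  split_ifs <;>
    simp only [List.nil_append, List.cons_append] <;>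
    norm_num <;>
    first
      | omega
      | exact PySem.List.sorted_eq_self_of_pairwise _ _ (by decide)

-- ===== VERDICT (by name: the statement is the Claim_ definition above) =====
theorem solution_spec : Claim_equal_solution := by
  intro answers _
  unfold Spec_solution solution solution_alt
  simp only []
  rw [triple_fold]
  simp only [zero_add, a_count, chunk_eq]
  exact select_eq _ _ _
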